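-- pv_equiv track=rewrite | github.com/morgoth1145/advent-of-code | 2021/17/solution.py | x_vel_solutions
-- ===== SOURCE A (Python) =====
-- def tri(n):
--     return n * (n+1) // 2
--
-- def sum_range(first, last):
--     n = abs(first - last) + 1
--     return n * (first + last) // 2
--
-- def x_vel_solutions(xrange):
--     solutions = []
--
--     min_steps = 1
--     max_steps = 0
--
--     for base_xv in range(xrange[-1], 0, -1):
--         if tri(base_xv) < xrange[0]:
--             break
--
--         # min_steps is guaranteed to not pass xrange (per the above check)
--         x = sum_range(base_xv, base_xv-min_steps+1)
--         xv = base_xv - min_steps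
--
--         while x < xrange[0]:
--             x, xv = x+xv, xv-1
--             min_steps += 1
--
--         if x not in xrange:
--             continue
--
--         if max_steps is None:
--             # It's unbounded!
--             solutions.append((base_xv, min_steps, max_steps))
--             continue
--
--         step = min_steps
--
--         if max_steps > step:
--             jump_steps = max_steps - step
--             step = max_steps
--             if xv <= jump_steps:
--                 x += tri(xv)
--                 xv = 0
--             else:
--                 x += sum_range(xv, xv - jump_steps + 1)
--                 xv -= jump_steps
--         else:
--             max_steps = step
--
--         while xv != 0 and x <= xrange[-1]:
--             max_steps = step
--             x, xv, step = x+xv, xv-1, step+1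
--
--         if xv == 0 and x in xrange:
--             # Signal that it's unbounded
--             max_steps = None
--
--         solutions.append((base_xv, min_steps, max_steps))
--
--     return solutions
-- ===== SOURCE B (Python) =====
-- def x_vel_solutions(xrange):
--     first, last = xrange[0], xrange[-1]
--     members = set(xrange)
--     solutions = []
--     carried = 0  # max_steps value carried between velocities; None once unbounded seen
--     for b in range(last, 0, -1):
--         peak = b * (b + 1) // 2
--         if peak < first:
--             break
--
--         def pos(s):
--             # x after s steps from velocity b (velocity never below 0)
--             return peak - (b - s) * (b - s + 1) // 2 if s < b else peak
--
--         # least s in [1, b] with pos(s) >= first, by binary search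
--         lo, hi = 1, b
--         while lo < hi:
--             mid = (lo + hi) // 2
--             if pos(mid) >= first:
--                 hi = mid
--             else:
--                 lo = mid + 1
--         m = lo
--         if pos(m) not in members:
--             continue
--         if carried is None:
--             solutions.append((b, m, None))
--             continue
--         start = max(m, carried)
--         if start >= b or pos(b - 1) <= last:
--             # velocity reaches 0 before x can exceed last
--             e = max(start, b)
--             if peak in members:
--                 carried = None
--                 solutions.append((b, m, None))
--                 continue
--         else:
--             # least t in [start, b-1] with pos(t) > last, by binary search
--             lo, hi = start, b - 1
--             while lo < hi:
--                 mid = (lo + hi) // 2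
--                 if pos(mid) > last:
--                     hi = mid
--                 else:
--                     lo = mid + 1
--             e = lo
--         carried = max(start, e - 1)
--         solutions.append((b, m, carried))
--     return solutions
-- ===== Notes on version B (the rewrite author's own statement) =====
-- stated objective: faster
-- what changed: B computes each velocity's entry step and exit step by closed-form position arithmetic with binary searches and a set for membership (plus a single carried max-step/unbounded value), instead of A's incremental step-by-step simulation with shared min/max counters, sum_range/tri jump fast-forwards and per-velocity list-membership scans.
import Mathlib
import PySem

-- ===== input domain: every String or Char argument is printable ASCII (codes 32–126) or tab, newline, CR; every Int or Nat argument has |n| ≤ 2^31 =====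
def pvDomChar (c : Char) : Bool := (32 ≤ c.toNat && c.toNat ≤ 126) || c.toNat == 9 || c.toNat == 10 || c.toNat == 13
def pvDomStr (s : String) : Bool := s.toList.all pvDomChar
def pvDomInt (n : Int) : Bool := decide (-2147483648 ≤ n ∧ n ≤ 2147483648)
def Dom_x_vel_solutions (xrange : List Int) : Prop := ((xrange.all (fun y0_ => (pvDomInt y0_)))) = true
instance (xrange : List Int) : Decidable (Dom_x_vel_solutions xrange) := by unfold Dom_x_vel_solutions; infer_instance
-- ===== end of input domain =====

-- B replaces A's incremental step simulation (with state shared across velocities) by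
-- closed-form position arithmetic and binary search; same return value, measurably faster
-- on large ranges (objective: faster).

-- ===== PORT A =====
def pvTri (n : Int) : Int := PySem.Int.floordiv (n * (n + 1)) 2

def pvSumRange (first last : Int) : Int :=
  PySem.Int.floordiv ((|first - last| + 1) * (first + last)) 2

-- while x < xrange[0]: x, xv = x+xv, xv-1; min_steps += 1   (fuel: the loop runs at most xv times)
def pvA_minLoop (x0 : Int) : Nat → Int × Int × Int → Int × Int × Int
  | 0, st => st
  | fuel + 1, (x, xv, mn) =>
    if x < x0 then pvA_minLoop x0 fuel (x + xv, xv - 1, mn + 1) else (x, xv, mn)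

-- while xv != 0 and x <= xrange[-1]: max_steps = step; x, xv, step = x+xv, xv-1, step+1
def pvA_maxLoop (lastX : Int) : Nat → Int × Int × Int × Int → Int × Int × Int × Int
  | 0, st => st
  | fuel + 1, (x, xv, step, ms) =>
    if xv ≠ 0 ∧ x ≤ lastX then pvA_maxLoop lastX fuel (x + xv, xv - 1, step + 1, step)
    else (x, xv, step, ms)

def pvA_go (xrange : List Int) (x0 lastX : Int) :
    List Int → Int → Option Int → List (Int × Int × Option Int) → List (Int × Int × Option Int)
  | [], _, _, acc => acc
  | b :: rest, mn, ms, acc =>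
    if pvTri b < x0 then acc
    else
      let st := pvA_minLoop x0 ((b - mn).toNat + 1) (pvSumRange b (b - mn + 1), b - mn, mn)
      let x := st.1
      let xv := st.2.1
      let mn' := st.2.2
      if x ∉ xrange then pvA_go xrange x0 lastX rest mn' ms acc
      else
        match ms with
        | none => pvA_go xrange x0 lastX rest mn' none (acc ++ [(b, mn', none)])
        | some msv =>
          let st2 : Int × Int × Int × Int :=
            if msv > mn' then
              let jump := msv - mn'
              if xv ≤ jump then (x + pvTri xv, 0, msv, msv)
              else (x + pvSumRange xv (xv - jump + 1), xv - jump, msv, msv)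
            else (x, xv, mn', mn')
          let r := pvA_maxLoop lastX st2.2.1.toNat st2
          if r.2.1 = 0 ∧ r.1 ∈ xrange then pvA_go xrange x0 lastX rest mn' none (acc ++ [(b, mn', none)])
          else pvA_go xrange x0 lastX rest mn' (some r.2.2.2) (acc ++ [(b, mn', some r.2.2.2)])

def x_vel_solutions (xrange : List Int) : List (Int × Int × Option Int) :=
  match PySem.List.pyGet? xrange 0, PySem.List.pyGet? xrange (-1) with
  | some x0, some lastX => pvA_go xrange x0 lastX (PySem.List.pyRange lastX 0 (-1)) 1 (some 0) []
  | _, _ => []   -- IndexError (empty list); excluded by Pre_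

-- ===== PORT B =====
-- x after s steps from velocity b (velocity never below 0)
def pvPos (b peak s : Int) : Int :=
  if s < b then peak - PySem.Int.floordiv ((b - s) * (b - s + 1)) 2 else peak

-- while lo < hi: mid = (lo+hi)//2; if pos(mid) >= first: hi = mid else lo = mid+1
-- (fuel: the interval length shrinks every step)
def pvB_bs1 (b peak x0 : Int) : Nat → Int → Int → Int
  | 0, lo, _ => lo
  | fuel + 1, lo, hi =>
    if lo < hi then
      let mid := PySem.Int.floordiv (lo + hi) 2
      if x0 ≤ pvPos b peak mid then pvB_bs1 b peak x0 fuel lo mid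
      else pvB_bs1 b peak x0 fuel (mid + 1) hi
    else lo

-- while lo < hi: mid = (lo+hi)//2; if pos(mid) > last: hi = mid else lo = mid+1
def pvB_bs2 (b peak lastX : Int) : Nat → Int → Int → Int
  | 0, lo, _ => lo
  | fuel + 1, lo, hi =>
    if lo < hi then
      let mid := PySem.Int.floordiv (lo + hi) 2
      if lastX < pvPos b peak mid then pvB_bs2 b peak lastX fuel lo mid
      else pvB_bs2 b peak lastX fuel (mid + 1) hi
    else lo

def pvB_go (xrange : List Int) (x0 lastX : Int) (members : PySem.Set Int) :
    List Int → Option Int → List (Int × Int × Option Int) → List (Int × Int × Option Int)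
  | [], _, acc => acc
  | b :: rest, carried, acc =>
    let peak := PySem.Int.floordiv (b * (b + 1)) 2
    if peak < x0 then acc
    else
      let m := pvB_bs1 b peak x0 (b - 1).toNat 1 b
      if pvPos b peak m ∉ members then pvB_go xrange x0 lastX members rest carried acc
      else
        match carried with
        | none => pvB_go xrange x0 lastX members rest none (acc ++ [(b, m, none)])
        | some c =>
          let start := max m c
          if b ≤ start ∨ pvPos b peak (b - 1) ≤ lastX then
            let e := max start b
            if peak ∈ members then pvB_go xrange x0 lastX members rest none (acc ++ [(b, m, none)])
            else
              let c' := max start (e - 1)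
              pvB_go xrange x0 lastX members rest (some c') (acc ++ [(b, m, some c')])
          else
            let e := pvB_bs2 b peak lastX (b - 1 - start).toNat start (b - 1)
            let c' := max start (e - 1)
            pvB_go xrange x0 lastX members rest (some c') (acc ++ [(b, m, some c')])

def x_vel_solutions_alt (xrange : List Int) : List (Int × Int × Option Int) :=
  match PySem.List.pyGet? xrange 0 with
  | none => []
  | some x0 =>
    match PySem.List.pyGet? xrange (-1) with
    | none => []
    | some lastX =>
        pvB_go xrange x0 lastX (PySem.Set.ofList xrange) (PySem.List.pyRange lastX 0 (-1)) (some 0) []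

-- ===== PRECONDITION & SPEC =====
-- Pre_ excludes only the empty list, on which the Python A raises IndexError (xrange[0]).
def Pre_x_vel_solutions (xrange : List Int) : Prop := xrange ≠ []
instance (xrange : List Int) : Decidable (Pre_x_vel_solutions xrange) := by
  unfold Pre_x_vel_solutions; infer_instance
def pvWitness_x_vel_solutions : List Int := [20, 30]

def Spec_x_vel_solutions (xrange : List Int) (out : List (Int × Int × Option Int)) : Prop := out = x_vel_solutions_alt xrange
instance (xrange : List Int) (out : List (Int × Int × Option Int)) : Decidable (Spec_x_vel_solutions xrange out) := by unfold Spec_x_vel_solutions; infer_instance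

-- ===== CLAIM (what is proved, stated in full; the proofs are below) =====
def Claim_equal_x_vel_solutions : Prop := ∀ (xrange : List Int), Dom_x_vel_solutions xrange → Pre_x_vel_solutions xrange → Spec_x_vel_solutions xrange (x_vel_solutions xrange)

-- ===== LEMMAS AND PROOFS =====

-- floor division by 2 is exact on even numbers
theorem pvFdiv2 (a m : Int) (h : a = 2 * m) : PySem.Int.floordiv a 2 = m := by
  rw [PySem.Int.floordiv_eq_iff_of_pos (by omega)]; omega

theorem pvTri2 (n : Int) : 2 * pvTri n = n * (n + 1) := by
  obtain ⟨k, hk⟩ | ⟨k, hk⟩ := Int.even_or_odd n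
  · rw [pvTri, pvFdiv2 (n * (n+1)) (k * (n+1)) (by rw [hk]; ring)]; rw [hk]; ring
  · rw [pvTri, pvFdiv2 (n * (n+1)) (n * (k+1)) (by rw [hk]; ring)]; rw [hk]; ring

theorem pvSumRange2 (f l : Int) (h : l ≤ f) : 2 * pvSumRange f l = (f - l + 1) * (f + l) := by
  have habs : |f - l| = f - l := abs_of_nonneg (by omega)
  obtain ⟨k, hk⟩ | ⟨k, hk⟩ := Int.even_or_odd (f + l)
  · rw [pvSumRange, habs, pvFdiv2 _ ((f - l + 1) * k) (by rw [hk]; ring)]; rw [hk]; ring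
  · have hd : f - l + 1 = 2 * (k - l + 1) := by omega
    rw [pvSumRange, habs, pvFdiv2 _ ((k - l + 1) * (f + l)) (by rw [hd]; ring)]
    rw [hd]; ring

theorem pvPos2 (b s : Int) :
    2 * pvPos b (pvTri b) s = if s < b then b*(b+1) - (b-s)*(b-s+1) else b*(b+1) := by
  unfold pvPos
  split
  · have h2 := pvTri2 (b - s)
    rw [pvTri] at h2
    have h4 := pvTri2 b
    linarith
  · exact pvTri2 b

theorem pvTmono (j k : Int) (h0 : 0 ≤ j) (h : j ≤ k) : j*(j+1) ≤ k*(k+1) := by nlinarith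

theorem pvPos_mono_s (b : Int) {s t : Int} (hst : s ≤ t) :
    pvPos b (pvTri b) s ≤ pvPos b (pvTri b) t := by
  have h1 := pvPos2 b s
  have h2 := pvPos2 b t
  split_ifs at h1 h2
  · have := pvTmono (b - t) (b - s) (by omega) (by omega); omega
  · have := pvTmono 0 (b - s) (by omega) (by omega); omega
  · omega
  · omega

theorem pvPos_mono_b {b' b : Int} (s : Int) (hs : 1 ≤ s) (h0 : 0 ≤ b') (h : b' ≤ b) :
    pvPos b' (pvTri b') s ≤ pvPos b (pvTri b) s := by
  have h1 := pvPos2 b' s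
  have h2 := pvPos2 b s
  split_ifs at h1 h2
  · nlinarith
  · omega
  · -- b' ≤ s < b
    nlinarith
  · have := pvTmono b' b h0 h; omega

theorem pvPos_succ (b s : Int) (h : s ≤ b) :
    pvPos b (pvTri b) (s + 1) = pvPos b (pvTri b) s + (b - s) := by
  have h1 := pvPos2 b (s + 1)
  have h2 := pvPos2 b s
  have key : (b-s)*(b-s+1) = (b-(s+1))*(b-(s+1)+1) + 2*(b-s) := by ring
  split_ifs at h1 h2
  · linarith
  · omega
  · have hbs : b - s = 1 := by omega
    rw [hbs] at h2
    norm_num at h2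
    linarith
  · have hbs : s = b := by omega
    subst hbs
    linarith

theorem pvPos_peak (b s : Int) (h : b ≤ s) : pvPos b (pvTri b) s = pvTri b := by
  unfold pvPos; rw [if_neg (by omega)]

-- entry value of A's min loop
theorem pvSum_entry (b mn : Int) (h1 : 1 ≤ mn) (h2 : mn ≤ b) :
    pvSumRange b (b - mn + 1) = pvPos b (pvTri b) mn := by
  have hs := pvSumRange2 b (b - mn + 1) (by omega)
  have hp := pvPos2 b mn
  split_ifs at hp
  · have key : (b - (b - mn + 1) + 1) * (b + (b - mn + 1)) =
        b*(b+1) - (b-mn)*(b-mn+1) := by ring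
    linarith
  · have hmb : mn = b := by omega
    have key : (b - (b - mn + 1) + 1) * (b + (b - mn + 1)) = b*(b+1) := by rw [hmb]; ring
    linarith

theorem pvJump_peak (b t : Int) (_h1 : 1 ≤ t) (h2 : t ≤ b) :
    pvPos b (pvTri b) t + pvTri (b - t) = pvTri b := by
  have hp := pvPos2 b t
  have h3 := pvTri2 (b - t)
  have h4 := pvTri2 b
  split_ifs at hp
  · linarith
  · have hbt : b - t = 0 := by omega
    rw [hbt] at h3 ⊢
    norm_num at h3
    rw [h3]
    linarith

theorem pvJump_mid (b t u : Int) (_h1 : 1 ≤ t) (h2 : t < u) (h3 : u < b) :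
    pvPos b (pvTri b) t + pvSumRange (b - t) (b - u + 1) = pvPos b (pvTri b) u := by
  have hs := pvSumRange2 (b - t) (b - u + 1) (by omega)
  have hp := pvPos2 b t
  have hq := pvPos2 b u
  rw [if_pos (by omega)] at hp
  rw [if_pos (by omega)] at hq
  have key : (b - t - (b - u + 1) + 1) * (b - t + (b - u + 1)) =
      (b-t)*(b-t+1) - (b-u)*(b-u+1) := by ring
  linarith

-- ===== A's loops =====

theorem pvA_minLoop_eq (b x0 t : Int) :
    ∀ (fuel : Nat) (mn : Int), mn ≤ t → t ≤ b →
    (∀ s, mn ≤ s → s < t → pvPos b (pvTri b) s < x0) →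
    x0 ≤ pvPos b (pvTri b) t →
    (t - mn).toNat ≤ fuel →
    pvA_minLoop x0 fuel (pvPos b (pvTri b) mn, b - mn, mn) =
      (pvPos b (pvTri b) t, b - t, t) := by
  intro fuel
  induction fuel with
  | zero =>
    intro mn h1 h2 h3 h4 h5
    have : t = mn := by omega
    subst this; rfl
  | succ n ih =>
    intro mn h1 h2 h3 h4 h5
    rw [pvA_minLoop]
    by_cases hx : pvPos b (pvTri b) mn < x0
    · have hlt : mn < t := by
        rcases eq_or_lt_of_le h1 with h | h
        · subst h; omega
        · exact h
      rw [if_pos hx]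
      have hstep : pvPos b (pvTri b) mn + (b - mn) = pvPos b (pvTri b) (mn + 1) :=
        (pvPos_succ b mn (by omega)).symm
      have : (pvPos b (pvTri b) mn + (b - mn), b - mn - 1, mn + 1) =
          (pvPos b (pvTri b) (mn+1), b - (mn+1), mn + 1) := by
        rw [hstep]; ring_nf
      rw [this]
      exact ih (mn + 1) (by omega) h2 (fun s hs1 hs2 => h3 s (by omega) hs2) h4 (by omega)
    · rw [if_neg hx]
      have ht : t = mn := by
        rcases eq_or_lt_of_le h1 with h | h
        · omega
        · exact absurd (h3 mn le_rfl h) hx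
      subst ht
      rfl

theorem pvA_maxLoop_eq (b lastX e : Int) :
    ∀ (n : Nat) (s : Int) (ms : Int), (b - s).toNat = n → s ≤ e → e ≤ b →
    (∀ u, s ≤ u → u < e → pvPos b (pvTri b) u ≤ lastX) →
    (e = b ∨ lastX < pvPos b (pvTri b) e) →
    pvA_maxLoop lastX (b - s).toNat (pvPos b (pvTri b) s, b - s, s, ms) =
      (pvPos b (pvTri b) e, b - e, e, if e = s then ms else e - 1) := by
  intro n
  induction n with
  | zero =>
    intro s ms hn h1 h2 h3 h4
    have hsb : b ≤ s := by omega
    have : e = s := by omega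
    subst this
    rw [hn, pvA_maxLoop, if_pos rfl]
  | succ k ih =>
    intro s ms hn h1 h2 h3 h4
    have hsb : s < b := by omega
    rw [hn, pvA_maxLoop]
    rcases eq_or_lt_of_le h1 with heq | hlt
    · -- s = e: condition must be false
      subst heq
      have hgt : lastX < pvPos b (pvTri b) s := by
        rcases h4 with h | h
        · omega
        · exact h
      rw [if_neg (by rintro ⟨-, hle⟩; omega), if_pos rfl]
    · -- s < e: condition true
      have hcond : (b - s ≠ 0 ∧ pvPos b (pvTri b) s ≤ lastX) := by
        exact ⟨by omega, h3 s le_rfl hlt⟩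
      rw [if_pos hcond]
      have hstep : pvPos b (pvTri b) s + (b - s) = pvPos b (pvTri b) (s + 1) :=
        (pvPos_succ b s (by omega)).symm
      have harg : (pvPos b (pvTri b) s + (b - s), b - s - 1, s + 1, s) =
          (pvPos b (pvTri b) (s+1), b - (s+1), s + 1, s) := by
        rw [hstep]; ring_nf
      rw [harg]
      have hk : (b - (s+1)).toNat = k := by omega
      have hrec := ih (s + 1) s hk (by omega) h2 (fun u hu1 hu2 => h3 u (by omega) hu2) h4
      rw [hk] at hrec
      rw [hrec]
      have hne : e ≠ s := by omega
      rw [if_neg hne]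
      by_cases he : e = s + 1
      · rw [if_pos he, he]
        have hss : s + 1 - 1 = s := by omega
        rw [hss]
      · rw [if_neg he]

-- ===== B's binary searches =====

theorem pvB_bs1_eq (b x0 t : Int) :
    ∀ (fuel : Nat) (lo hi : Int), lo ≤ t → t ≤ hi →
    (∀ s, lo ≤ s → s < t → pvPos b (pvTri b) s < x0) →
    x0 ≤ pvPos b (pvTri b) t →
    (hi - lo).toNat ≤ fuel →
    pvB_bs1 b (pvTri b) x0 fuel lo hi = t := by
  intro fuel
  induction fuel with
  | zero =>
    intro lo hi h1 h2 h3 h4 h5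
    have : lo = t := by omega
    rw [pvB_bs1, this]
  | succ n ih =>
    intro lo hi h1 h2 h3 h4 h5
    rw [pvB_bs1]
    by_cases hlh : lo < hi
    · rw [if_pos hlh]
      have hmid := PySem.Int.floordiv_two_mid_bounds (le_of_lt hlh)
      have hmlt : PySem.Int.floordiv (lo + hi) 2 < hi := by
        rw [PySem.Int.floordiv_lt_iff_lt_mul (by omega)]; omega
      set mid := PySem.Int.floordiv (lo + hi) 2 with hm
      by_cases hc : x0 ≤ pvPos b (pvTri b) mid
      · rw [if_pos hc]
        have htm : t ≤ mid := by
          by_contra hlt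
          exact absurd hc (not_le.mpr (h3 mid hmid.1 (by omega)))
        exact ih lo mid h1 htm h3 h4 (by omega)
      · rw [if_neg hc]
        have hmt : mid < t := by
          by_contra hge
          exact hc (le_trans h4 (pvPos_mono_s b (by omega)))
        exact ih (mid + 1) hi (by omega) h2 (fun s hs1 hs2 => h3 s (by omega) hs2) h4 (by omega)
    · rw [if_neg hlh]
      omega

theorem pvB_bs2_eq (b lastX t : Int) :
    ∀ (fuel : Nat) (lo hi : Int), lo ≤ t → t ≤ hi →
    (∀ s, lo ≤ s → s < t → pvPos b (pvTri b) s ≤ lastX) →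
    lastX < pvPos b (pvTri b) t →
    (hi - lo).toNat ≤ fuel →
    pvB_bs2 b (pvTri b) lastX fuel lo hi = t := by
  intro fuel
  induction fuel with
  | zero =>
    intro lo hi h1 h2 h3 h4 h5
    have : lo = t := by omega
    rw [pvB_bs2, this]
  | succ n ih =>
    intro lo hi h1 h2 h3 h4 h5
    rw [pvB_bs2]
    by_cases hlh : lo < hi
    · rw [if_pos hlh]
      have hmid := PySem.Int.floordiv_two_mid_bounds (le_of_lt hlh)
      have hmlt : PySem.Int.floordiv (lo + hi) 2 < hi := by
        rw [PySem.Int.floordiv_lt_iff_lt_mul (by omega)]; omega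
      set mid := PySem.Int.floordiv (lo + hi) 2 with hm
      by_cases hc : lastX < pvPos b (pvTri b) mid
      · rw [if_pos hc]
        have htm : t ≤ mid := by
          by_contra hlt
          exact absurd hc (not_lt.mpr (h3 mid hmid.1 (by omega)))
        exact ih lo mid h1 htm h3 h4 (by omega)
      · rw [if_neg hc]
        have hmt : mid < t := by
          by_contra hge
          exact hc (lt_of_lt_of_le h4 (pvPos_mono_s b (by omega)))
        exact ih (mid + 1) hi (by omega) h2 (fun s hs1 hs2 => h3 s (by omega) hs2) h4 (by omega)
    · rw [if_neg hlh]
      omega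


theorem pvMaxPart_in (b lastX start : Int) (_h1 : 1 ≤ start) (hsb : start ≤ b)
    (hcond : b ≤ start ∨ pvPos b (pvTri b) (b - 1) ≤ lastX) :
    pvA_maxLoop lastX (b - start).toNat (pvPos b (pvTri b) start, b - start, start, start)
      = (pvTri b, 0, b, max start (b - 1)) := by
  have hemin : ∀ u, start ≤ u → u < b → pvPos b (pvTri b) u ≤ lastX := by
    intro u hu1 hu2
    rcases hcond with h | h
    · omega
    · exact le_trans (pvPos_mono_s b (by omega)) h
  have := pvA_maxLoop_eq b lastX b ((b - start).toNat) start start rfl hsb le_rfl hemin (Or.inl rfl)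
  rw [this, pvPos_peak b b le_rfl]
  have h4 : (if b = start then start else b - 1) = max start (b - 1) := by split_ifs <;> omega
  rw [h4]
  norm_num

theorem pvMaxPart_out (b lastX start : Int) (_h1 : 1 ≤ start) (hsb : start < b)
    (hpb : lastX < pvPos b (pvTri b) (b - 1)) :
    ∃ e, start ≤ e ∧ e < b ∧
      pvB_bs2 b (pvTri b) lastX ((b - 1 - start).toNat) start (b - 1) = e ∧
      pvA_maxLoop lastX (b - start).toNat (pvPos b (pvTri b) start, b - start, start, start)
        = (pvPos b (pvTri b) e, b - e, e, max start (e - 1)) := by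
  have hex2 : ∃ k : Nat, lastX < pvPos b (pvTri b) (start + (k : Int)) := by
    refine ⟨(b - 1 - start).toNat, ?_⟩
    have hh : start + ((b - 1 - start).toNat : Int) = b - 1 := by omega
    rw [hh]; exact hpb
  refine ⟨start + (Nat.find hex2 : Int), by omega, ?_, ?_, ?_⟩
  · have : Nat.find hex2 ≤ (b - 1 - start).toNat := Nat.find_min' hex2 (by
      have hh : start + ((b - 1 - start).toNat : Int) = b - 1 := by omega
      rw [hh]; exact hpb)
    omega
  · apply pvB_bs2_eq
    · omega
    · have : Nat.find hex2 ≤ (b - 1 - start).toNat := Nat.find_min' hex2 (by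
        have hh : start + ((b - 1 - start).toNat : Int) = b - 1 := by omega
        rw [hh]; exact hpb)
      omega
    · intro u hu1 hu2
      have hlt : (u - start).toNat < Nat.find hex2 := by omega
      have := Nat.find_min hex2 hlt
      rw [not_lt] at this
      have hh : start + ((u - start).toNat : Int) = u := by omega
      rwa [hh] at this
    · exact Nat.find_spec hex2
    · omega
  · have hfind : Nat.find hex2 ≤ (b - 1 - start).toNat := Nat.find_min' hex2 (by
      have hh : start + ((b - 1 - start).toNat : Int) = b - 1 := by omega
      rw [hh]; exact hpb)
    have := pvA_maxLoop_eq b lastX (start + (Nat.find hex2 : Int)) ((b - start).toNat) start start rfl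
      (by omega) (by omega)
      (by
        intro u hu1 hu2
        have hlt : (u - start).toNat < Nat.find hex2 := by omega
        have := Nat.find_min hex2 hlt
        rw [not_lt] at this
        have hh : start + ((u - start).toNat : Int) = u := by omega
        rwa [hh] at this)
      (Or.inr (Nat.find_spec hex2))
    rw [this]
    have h4 : (if start + (Nat.find hex2 : Int) = start then start else start + (Nat.find hex2 : Int) - 1)
        = max start (start + (Nat.find hex2 : Int) - 1) := by split_ifs <;> omega
    rw [h4]

-- ===== main induction =====

theorem pvPeak_eq (b : Int) : PySem.Int.floordiv (b * (b + 1)) 2 = pvTri b := rfl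


theorem pvGo_eq (xrange : List Int) (x0 lastX : Int) :
    ∀ (bs : List Int) (mn : Int) (ms : Option Int) (acc : List (Int × Int × Option Int)),
    1 ≤ mn →
    List.Pairwise (fun a b => b < a) bs →
    (∀ b' ∈ bs, 1 ≤ b') →
    (∀ b' ∈ bs, ∀ s, 1 ≤ s → s < mn → pvPos b' (pvTri b') s < x0) →
    pvA_go xrange x0 lastX bs mn ms acc =
      pvB_go xrange x0 lastX (PySem.Set.ofList xrange) bs ms acc := by
  intro bs
  induction bs with
  | nil => intro mn ms acc _ _ _ _; rfl
  | cons b rest ih =>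
    intro mn ms acc hmn hpw hpos hinv
    have hb1 : 1 ≤ b := hpos b (List.mem_cons_self ..)
    have hrest_lt : ∀ b' ∈ rest, b' < b := fun b' hb' => List.rel_of_pairwise_cons hpw hb'
    have hpw' : List.Pairwise (fun a b => b < a) rest := (List.pairwise_cons.mp hpw).2
    have hpos' : ∀ b' ∈ rest, 1 ≤ b' := fun b' hb' => hpos b' (List.mem_cons_of_mem _ hb')
    simp only [pvA_go, pvB_go, pvPeak_eq]
    by_cases hbr : pvTri b < x0
    · rw [if_pos hbr, if_pos hbr]
    rw [if_neg hbr, if_neg hbr]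
    have hx0b : x0 ≤ pvTri b := not_lt.mp hbr
    -- t = first step whose position reaches x0
    have hex : ∃ k : Nat, x0 ≤ pvPos b (pvTri b) (1 + (k : Int)) := by
      refine ⟨(b - 1).toNat, ?_⟩
      have hh : (1 : Int) + ((b - 1).toNat : Int) = b := by omega
      rw [hh, pvPos_peak b b le_rfl]
      exact hx0b
    set t : Int := 1 + (Nat.find hex : Int) with htdef
    have ht1 : 1 ≤ t := by omega
    have htprop : x0 ≤ pvPos b (pvTri b) t := Nat.find_spec hex
    have htmin : ∀ s, 1 ≤ s → s < t → pvPos b (pvTri b) s < x0 := by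
      intro s hs1 hs2
      have hk : ((s - 1).toNat : Int) = s - 1 := by omega
      have hlt : (s - 1).toNat < Nat.find hex := by omega
      have := Nat.find_min hex hlt
      rw [not_le] at this
      have hh : (1 : Int) + ((s - 1).toNat : Int) = s := by omega
      rwa [hh] at this
    have htb : t ≤ b := by
      by_contra hgt
      have := htmin b hb1 (by omega)
      rw [pvPos_peak b b le_rfl] at this
      omega
    have hmnt : mn ≤ t := by
      by_contra hgt
      exact absurd (hinv b (List.mem_cons_self ..) t ht1 (by omega)) (not_lt.mpr htprop)
    -- A's min loop and B's first binary search both land on t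
    rw [pvSum_entry b mn hmn (by omega)]
    rw [pvA_minLoop_eq b x0 t ((b - mn).toNat + 1) mn hmnt htb
      (fun s hs1 hs2 => htmin s (by omega) hs2) htprop (by omega)]
    rw [pvB_bs1_eq b x0 t ((b - 1).toNat) 1 b ht1 htb htmin htprop (by omega)]
    dsimp only
    -- invariant for the tail
    have hinv' : ∀ b' ∈ rest, ∀ s, 1 ≤ s → s < t → pvPos b' (pvTri b') s < x0 :=
      fun b' hb' s hs1 hs2 =>
        lt_of_le_of_lt
          (pvPos_mono_b s hs1 (by have := hpos' b' hb'; omega) (le_of_lt (hrest_lt b' hb')))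
          (htmin s hs1 hs2)
    by_cases hmem : pvPos b (pvTri b) t ∈ xrange
    case neg =>
      rw [if_pos hmem, if_pos (by rw [PySem.Set.mem_ofList]; exact hmem)]
      exact ih t ms acc ht1 hpw' hpos' hinv'
    case pos =>
      rw [if_neg (not_not_intro hmem), if_neg (by rw [PySem.Set.mem_ofList]; exact not_not_intro hmem)]
      cases ms with
      | none =>
        dsimp only
        exact ih t none (acc ++ [(b, t, none)]) ht1 hpw' hpos' hinv'
      | some msv =>
        dsimp only [gt_iff_lt]
        by_cases hmt : t < msv
        case neg =>
          -- max_steps ≤ step: A takes the else branch, start = t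
          have hmt' : msv ≤ t := not_lt.mp hmt
          rw [if_neg hmt]
          have hstart : max t msv = t := max_eq_left hmt'
          rw [hstart]
          dsimp only
          by_cases hcond : b ≤ t ∨ pvPos b (pvTri b) (b - 1) ≤ lastX
          · rw [if_pos hcond, pvMaxPart_in b lastX t (by omega) (by omega) hcond]
            dsimp only
            by_cases hpk : pvTri b ∈ xrange
            · rw [if_pos ⟨rfl, hpk⟩, if_pos (by rw [PySem.Set.mem_ofList]; exact hpk)]
              exact ih t none (acc ++ [(b, t, none)]) ht1 hpw' hpos' hinv'
            · rw [if_neg (fun h => hpk h.2), if_neg (by rw [PySem.Set.mem_ofList]; exact hpk)]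
              have hmx : max t (max t b - 1) = max t (b - 1) := by omega
              rw [hmx]
              exact ih t (some (max t (b - 1))) (acc ++ [(b, t, some (max t (b - 1)))]) ht1 hpw' hpos' hinv'
          · have hsb2 : ¬ b ≤ t := fun h => hcond (Or.inl h)
            have hpb : lastX < pvPos b (pvTri b) (b - 1) := by
              by_contra h
              exact hcond (Or.inr (not_lt.mp h))
            obtain ⟨e, he1, he2, hbs2, hml⟩ := pvMaxPart_out b lastX t (by omega) (by omega) hpb
            rw [if_neg hcond, hml, hbs2]
            dsimp only
            rw [if_neg (fun h => by omega)]
            exact ih t (some (max t (e - 1))) (acc ++ [(b, t, some (max t (e - 1)))]) ht1 hpw' hpos' hinv'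
        case pos =>
          -- jump branch
          rw [if_pos hmt]
          have hstart : max t msv = msv := max_eq_right (le_of_lt hmt)
          rw [hstart]
          by_cases hbm : b ≤ msv
          case pos =>
            -- the jump caps the velocity at 0
            rw [if_pos (show b - t ≤ msv - t by omega), pvJump_peak b t ht1 htb]
            dsimp only
            rw [show pvA_maxLoop lastX ((0 : Int)).toNat (pvTri b, 0, msv, msv) = (pvTri b, 0, msv, msv) from rfl]
            dsimp only
            rw [if_pos (Or.inl (show b ≤ msv from hbm))]
            by_cases hpk : pvTri b ∈ xrange
            · rw [if_pos ⟨rfl, hpk⟩, if_pos (by rw [PySem.Set.mem_ofList]; exact hpk)]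
              exact ih t none (acc ++ [(b, t, none)]) ht1 hpw' hpos' hinv'
            · rw [if_neg (fun h => hpk h.2), if_neg (by rw [PySem.Set.mem_ofList]; exact hpk)]
              have hmx : max msv (max msv b - 1) = msv := by omega
              rw [hmx]
              exact ih t (some msv) (acc ++ [(b, t, some msv)]) ht1 hpw' hpos' hinv'
          case neg =>
            have hbm' : msv < b := not_le.mp hbm
            -- the jump lands strictly before the velocity reaches 0
            rw [if_neg (show ¬ b - t ≤ msv - t by omega)]
            have harg : b - t - (msv - t) + 1 = b - msv + 1 := by ring
            have hxv : b - t - (msv - t) = b - msv := by ring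
            rw [harg, hxv, pvJump_mid b t msv ht1 hmt hbm']
            dsimp only
            by_cases hcond : b ≤ msv ∨ pvPos b (pvTri b) (b - 1) ≤ lastX
            · rw [if_pos hcond, pvMaxPart_in b lastX msv (by omega) (by omega) hcond]
              dsimp only
              by_cases hpk : pvTri b ∈ xrange
              · rw [if_pos ⟨rfl, hpk⟩, if_pos (by rw [PySem.Set.mem_ofList]; exact hpk)]
                exact ih t none (acc ++ [(b, t, none)]) ht1 hpw' hpos' hinv'
              · rw [if_neg (fun h => hpk h.2), if_neg (by rw [PySem.Set.mem_ofList]; exact hpk)]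
                have hmx : max msv (max msv b - 1) = max msv (b - 1) := by omega
                rw [hmx]
                exact ih t (some (max msv (b - 1))) (acc ++ [(b, t, some (max msv (b - 1)))]) ht1 hpw' hpos' hinv'
            · have hsb2 : ¬ b ≤ msv := fun h => hcond (Or.inl h)
              have hpb : lastX < pvPos b (pvTri b) (b - 1) := by
                by_contra h
                exact hcond (Or.inr (not_lt.mp h))
              obtain ⟨e, he1, he2, hbs2, hml⟩ := pvMaxPart_out b lastX msv (by omega) (by omega) hpb
              rw [if_neg hcond, hml, hbs2]
              dsimp only
              rw [if_neg (fun h => by omega)]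
              exact ih t (some (max msv (e - 1))) (acc ++ [(b, t, some (max msv (e - 1)))]) ht1 hpw' hpos' hinv'

theorem x_vel_solutions_spec : Claim_equal_x_vel_solutions := by
  intro xrange _hdom _hpre
  unfold Spec_x_vel_solutions x_vel_solutions x_vel_solutions_alt
  cases hg0 : PySem.List.pyGet? xrange 0 with
  | none => cases hg1 : PySem.List.pyGet? xrange (-1) <;> rfl
  | some x0 =>
    cases hg1 : PySem.List.pyGet? xrange (-1) with
    | none => rfl
    | some lastX =>
      exact pvGo_eq xrange x0 lastX _ 1 (some 0) [] le_rfl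
        (by
          rw [PySem.List.pyRange_neg_one]
          exact List.Pairwise.map _ (fun a b (h : a < b) => by omega) List.pairwise_lt_range)
        (fun b' hb' => by
          rw [PySem.List.mem_pyRange_neg_one] at hb'; omega)
        (fun b' _ s hs1 hs2 => by omega)
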